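-- pv_equiv track=rewrite | github.com/hieutmtechx/TensorTonic-Solutions | top-k-recommendations/top-k-recommendations.py | top_k_recommendations
-- ===== SOURCE A (Python) =====
-- def top_k_recommendations(scores, rated_indices, k):
--     """
--     Return indices of top-k unrated items by predicted score.
--     """
--     # Write code here
--
--     remainItems = []
--     for _ in range(len(scores)):
--         if (_ not in rated_indices):
--             remainItems.append((scores[_], _))
--
--     remainItems.sort(key = lambda x: x[0], reverse = True)
--
--     k = min(k, len(remainItems))
--     topIndices = [remainItems[i][1] for i in range(k)]
--
--     return topIndices
-- ===== SOURCE B (Python) =====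
-- def top_k_recommendations(scores, rated_indices, k):
--     kk = max(k, 0)
--     buf = []  # at most kk pairs (score, index), score-descending, stable
--     for i, s in enumerate(scores):
--         if i not in rated_indices:
--             # binary search: first position whose entry has score strictly below s
--             lo, hi = 0, len(buf)
--             while lo < hi:
--                 mid = (lo + hi) // 2
--                 if buf[mid][0] < s:
--                     hi = mid
--                 else:
--                     lo = mid + 1
--             buf.insert(lo, (s, i))
--             if len(buf) > kk:
--                 buf.pop()
--     return [i for _, i in buf]
-- ===== Notes on version B (the rewrite author's own statement) =====
-- stated objective: alternative
-- what changed: Instead of collecting all unrated (score, index) pairs and fully sorting them before truncating, B makes a single pass over enumerate(scores) maintaining a bounded buffer of at most k pairs in score-descending order (insertion position found by hand-written binary search, buffer trimmed after each insert), so only the current top-k is ever kept.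
import Mathlib
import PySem

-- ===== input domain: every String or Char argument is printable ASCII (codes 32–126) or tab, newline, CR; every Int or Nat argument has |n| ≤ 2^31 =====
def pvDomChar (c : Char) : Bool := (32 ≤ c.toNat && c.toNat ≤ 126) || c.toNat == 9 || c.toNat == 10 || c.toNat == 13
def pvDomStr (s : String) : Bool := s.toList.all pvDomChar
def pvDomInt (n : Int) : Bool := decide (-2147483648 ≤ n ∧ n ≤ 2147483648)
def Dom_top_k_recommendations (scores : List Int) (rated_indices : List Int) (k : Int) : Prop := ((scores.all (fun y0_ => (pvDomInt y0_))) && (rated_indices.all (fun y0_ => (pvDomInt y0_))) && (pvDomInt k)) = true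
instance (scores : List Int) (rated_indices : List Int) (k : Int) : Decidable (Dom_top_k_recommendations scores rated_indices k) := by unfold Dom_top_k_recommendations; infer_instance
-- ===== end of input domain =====

-- B replaces A's filter-then-full-sort with a single pass keeping a size-k score-descending
-- buffer (bounded insertion), same return value on every input (objective: alternative).

-- ===== PORT A =====
def top_k_recommendations (scores : List Int) (rated_indices : List Int) (k : Int) : List Int :=
  -- remainItems = []; for _ in range(len(scores)): if _ not in rated_indices: remainItems.append((scores[_], _))
  let remainItems : List (Int × Int) :=
    (PySem.List.pyRange 0 (PySem.List.len scores) 1).foldl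
      (fun acc i => if ¬ (i ∈ rated_indices) then acc ++ [(PySem.List.pyGetD scores i 0, i)] else acc) []
  -- remainItems.sort(key=lambda x: x[0], reverse=True)
  let srt := PySem.List.sorted remainItems (fun x => x.1) true
  -- k = min(k, len(remainItems)); [remainItems[i][1] for i in range(k)]
  let k' := min k (PySem.List.len srt)
  (PySem.List.pyRange 0 k' 1).map (fun i => (PySem.List.pyGetD srt i (0, 0)).2)

-- ===== PORT B =====
-- the inner while loop: binary search for the first position whose score is strictly below s
def pvBisect (buf : List (Int × Int)) (s : Int) (lo hi : Int) : Int :=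
  if h : lo < hi then
    let mid := PySem.Int.floordiv (lo + hi) 2
    if (PySem.List.pyGetD buf mid (0, 0)).1 < s then pvBisect buf s lo mid
    else pvBisect buf s (mid + 1) hi
  else lo
termination_by (hi - lo).toNat
decreasing_by
  · have h1 := (PySem.Int.floordiv_lt_iff_lt_mul (a := lo + hi) (b := 2) (q := hi) (by omega)).mpr (by omega)
    omega
  · have h2 := (PySem.Int.le_floordiv_iff_mul_le (a := lo + hi) (b := 2) (q := lo) (by omega)).mpr (by omega)
    omega

def top_k_recommendations_alt (scores : List Int) (rated_indices : List Int) (k : Int) : List Int :=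
  let kk := max k 0
  let buf :=
    (PySem.List.enumerate scores).foldl
      (fun buf p =>
        if ¬ (p.1 ∈ rated_indices) then
          -- lo = binary-search position; buf.insert(lo, (s, i)); if len(buf) > kk: buf.pop()
          let nb := PySem.List.insert buf (pvBisect buf p.2 0 (PySem.List.len buf)) (p.2, p.1)
          if PySem.List.len nb > kk then nb.dropLast else nb
        else buf) []
  buf.map (fun p => p.2)

-- ===== PRECONDITION & SPEC =====
def Spec_top_k_recommendations (scores : List Int) (rated_indices : List Int) (k : Int) (out : List Int) : Prop := out = top_k_recommendations_alt scores rated_indices k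
instance (scores : List Int) (rated_indices : List Int) (k : Int) (out : List Int) : Decidable (Spec_top_k_recommendations scores rated_indices k out) := by unfold Spec_top_k_recommendations; infer_instance

-- ===== CLAIM (what is proved, stated in full; the proofs are below) =====
def Claim_equal_top_k_recommendations : Prop := ∀ (scores : List Int) (rated_indices : List Int) (k : Int), Dom_top_k_recommendations scores rated_indices k → Spec_top_k_recommendations scores rated_indices k (top_k_recommendations scores rated_indices k)

-- ===== LEMMAS AND PROOFS =====

-- proof-side helper: the position a LINEAR front scan would find
-- (number of leading buffer entries whose score is not < x)
def pvFindPos (x : Int) : List (Int × Int) → Nat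
  | [] => 0
  | y :: ys => if ¬ (y.1 < x) then pvFindPos x ys + 1 else 0

lemma pvFindPos_le (x : Int) : ∀ (buf : List (Int × Int)), pvFindPos x buf ≤ buf.length := by
  intro buf
  induction buf with
  | nil => simp [pvFindPos]
  | cons y t ih =>
    by_cases h : y.1 < x
    · simp [pvFindPos, h]
    · simp [pvFindPos, h]; omega

-- entries before the scan position do not have score < s
lemma pvFindPos_lower (s : Int) :
    ∀ (buf : List (Int × Int)) (j : Nat) (hj : j < buf.length),
      j < pvFindPos s buf → ¬ buf[j].1 < s := by
  intro buf
  induction buf with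
  | nil => intro j hj; simp at hj
  | cons y t ih =>
    intro j hj hlt
    by_cases h : y.1 < s
    · simp [pvFindPos, h] at hlt
    · cases j with
      | zero => simp only [List.getElem_cons_zero]; exact h
      | succ m =>
        simp [pvFindPos, h] at hlt
        exact ih m (by simpa using hj) hlt

-- the entry at the scan position (if any) has score < s
lemma pvFindPos_hit (s : Int) :
    ∀ (buf : List (Int × Int)) (h : pvFindPos s buf < buf.length),
      buf[pvFindPos s buf].1 < s := by
  intro buf
  induction buf with
  | nil => intro h; simp [pvFindPos] at h
  | cons y t ih =>
    intro h
    by_cases hy : y.1 < s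
    · simp [pvFindPos, hy]
    · have h' : pvFindPos s t < t.length := by
        simp [pvFindPos, hy] at h; omega
      simpa [pvFindPos, hy] using ih h'

-- any position with the scan position's two-sided certificate IS the scan position
lemma pvPos_unique (buf : List (Int × Int)) (s : Int) (r : Int)
    (h0 : 0 ≤ r) (hle : r ≤ (buf.length : Int))
    (hlow : ∀ (j : Nat) (hj : j < buf.length), j < r.toNat → ¬ buf[j].1 < s)
    (hhigh : ∀ (j : Nat) (hj : j < buf.length), r.toNat ≤ j → buf[j].1 < s) :
    r = ((pvFindPos s buf : Nat) : Int) := by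
  have hfle := pvFindPos_le s buf
  rcases Nat.lt_trichotomy r.toNat (pvFindPos s buf) with h | h | h
  · exact absurd (hhigh r.toNat (by omega) (le_refl _)) (pvFindPos_lower s buf r.toNat (by omega) h)
  · omega
  · exact absurd (pvFindPos_hit s buf (by omega)) (hlow (pvFindPos s buf) (by omega) h)

-- the binary search keeps a two-sided certificate (scores monotone w.r.t. '< s')
lemma pvBisect_cert (buf : List (Int × Int)) (s : Int)
    (hmono : ∀ (j1 j2 : Nat) (hj1 : j1 < buf.length) (hj2 : j2 < buf.length),
      j1 ≤ j2 → buf[j1].1 < s → buf[j2].1 < s) :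
    ∀ (n : Nat) (lo hi : Int), (hi - lo).toNat = n → 0 ≤ lo → lo ≤ hi → hi ≤ (buf.length : Int) →
    (∀ (j : Nat) (hj : j < buf.length), j < lo.toNat → ¬ buf[j].1 < s) →
    (∀ (j : Nat) (hj : j < buf.length), hi.toNat ≤ j → buf[j].1 < s) →
    0 ≤ pvBisect buf s lo hi ∧ pvBisect buf s lo hi ≤ (buf.length : Int) ∧
    (∀ (j : Nat) (hj : j < buf.length), j < (pvBisect buf s lo hi).toNat → ¬ buf[j].1 < s) ∧
    (∀ (j : Nat) (hj : j < buf.length), (pvBisect buf s lo hi).toNat ≤ j → buf[j].1 < s) := by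
  intro n
  induction n using Nat.strong_induction_on with
  | _ n ih =>
    intro lo hi hn h0 hlh hhl hlow hhigh
    rw [pvBisect]
    by_cases h : lo < hi
    · have hml : lo ≤ PySem.Int.floordiv (lo + hi) 2 :=
        (PySem.Int.le_floordiv_iff_mul_le (by omega)).mpr (by omega)
      have hmh : PySem.Int.floordiv (lo + hi) 2 < hi :=
        (PySem.Int.floordiv_lt_iff_lt_mul (by omega)).mpr (by omega)
      set mid := PySem.Int.floordiv (lo + hi) 2 with hmid
      have hmlen : mid.toNat < buf.length := by omega
      have hget : PySem.List.pyGetD buf mid ((0 : Int), (0 : Int)) = buf[mid.toNat]'hmlen :=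
        PySem.List.pyGetD_eq_getElem _ _ (by omega) (by omega)
      simp only [dif_pos h, hget]
      by_cases hp : (buf[mid.toNat]'hmlen).1 < s
      · rw [if_pos hp]
        exact ih (mid - lo).toNat (by omega) lo mid (by omega) h0 (by omega) (by omega) hlow
          (fun j hj hge => hmono mid.toNat j (by omega) hj (by omega) hp)
      · rw [if_neg hp]
        exact ih (hi - (mid + 1)).toNat (by omega) (mid + 1) hi (by omega) (by omega) (by omega) hhl
          (fun j hj hlt hcon => hp (hmono j mid.toNat hj (by omega) (by omega) hcon)) hhigh
    · simp only [dif_neg h]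
      exact ⟨h0, by omega,
        fun j hj hlt => hlow j hj (by omega),
        fun j hj hge => hhigh j hj (by omega)⟩

-- on a score-descending buffer the binary search finds the linear scan's position
lemma pvBisect_eq_findPos (buf : List (Int × Int)) (s : Int)
    (hsort : buf.Pairwise (fun a b => b.1 ≤ a.1)) :
    pvBisect buf s 0 (PySem.List.len buf) = ((pvFindPos s buf : Nat) : Int) := by
  have hmono : ∀ (j1 j2 : Nat) (hj1 : j1 < buf.length) (hj2 : j2 < buf.length),
      j1 ≤ j2 → buf[j1].1 < s → buf[j2].1 < s := by
    intro j1 j2 hj1 hj2 hle hP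
    rcases Nat.lt_or_ge j1 j2 with hlt | hge
    · have := List.pairwise_iff_getElem.mp hsort j1 j2 hj1 hj2 hlt
      omega
    · have : j1 = j2 := by omega
      subst this; exact hP
  have hcert := pvBisect_cert buf s hmono ((PySem.List.len buf : Int) - 0).toNat 0
    (PySem.List.len buf) rfl (by omega) (by simp [PySem.List.len_eq])
    (by simp [PySem.List.len_eq]) (by intro j hj hlt; omega)
    (by intro j hj hge; simp [PySem.List.len_eq] at hge; omega)
  exact pvPos_unique buf s _ hcert.1 (by simpa [PySem.List.len_eq] using hcert.2.1)
    hcert.2.2.1 hcert.2.2.2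

-- inserting at the linear scan's position is insertBy with the reverse-sort predicate
lemma insert_findPos_eq_insertBy (pr : Int × Int) :
    ∀ (buf : List (Int × Int)),
      PySem.List.insert buf ((pvFindPos pr.1 buf : Nat) : Int) pr
        = PySem.List.insertBy (fun a b => decide (b.1 < a.1)) pr buf := by
  intro buf
  induction buf with
  | nil => rfl
  | cons y t ih =>
    rw [PySem.List.insert_natCast _ _ _ (pvFindPos_le pr.1 (y :: t))]
    rw [PySem.List.insert_natCast _ _ _ (pvFindPos_le pr.1 t)] at ih
    by_cases h : y.1 < pr.1
    · simp [pvFindPos, h, PySem.List.insertBy]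
    · simp [pvFindPos, h, PySem.List.insertBy, ← ih]

-- insertBy with the reverse-sort predicate keeps the buffer score-descending
lemma insertBy_pairwise (pr : Int × Int) :
    ∀ (buf : List (Int × Int)), buf.Pairwise (fun a b => b.1 ≤ a.1) →
      (PySem.List.insertBy (fun a b => decide (b.1 < a.1)) pr buf).Pairwise
        (fun a b => b.1 ≤ a.1) := by
  intro buf
  induction buf with
  | nil => intro _; simp [PySem.List.insertBy]
  | cons y t ih =>
    intro hs
    rw [List.pairwise_cons] at hs
    by_cases h : y.1 < pr.1
    · simp only [PySem.List.insertBy, h, decide_true, if_true]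
      refine List.Pairwise.cons ?_ (List.Pairwise.cons hs.1 hs.2)
      intro b hb
      rcases List.mem_cons.mp hb with rfl | hbt
      · omega
      · have := hs.1 b hbt; omega
    · simp only [PySem.List.insertBy, h, decide_false]
      refine List.Pairwise.cons ?_ (ih hs.2)
      intro b hb
      rcases (PySem.List.mem_insertBy _ _ _ _).mp hb with rfl | hbt
      · omega
      · exact hs.1 b hbt

-- one body of B's loop, on a bounded score-descending buffer, is a trimmed insertBy
lemma pvStep_eq (kk : Int) (hkk : 0 ≤ kk) (pr : Int × Int) (buf : List (Int × Int))
    (hlen : buf.length ≤ kk.toNat) (hsort : buf.Pairwise (fun a b => b.1 ≤ a.1)) :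
    (let nb := PySem.List.insert buf (pvBisect buf pr.1 0 (PySem.List.len buf)) pr
     if PySem.List.len nb > kk then nb.dropLast else nb)
      = (PySem.List.insertBy (fun a b => decide (b.1 < a.1)) pr buf).take kk.toNat := by
  rw [pvBisect_eq_findPos buf pr.1 hsort]
  simp only [insert_findPos_eq_insertBy pr buf]
  set nb := PySem.List.insertBy (fun a b => decide (b.1 < a.1)) pr buf with hnb
  have hlnb : nb.length = buf.length + 1 := by
    -- length from the take/drop shape of insertBy
    rw [hnb, ← insert_findPos_eq_insertBy pr buf,
        PySem.List.insert_natCast _ _ _ (pvFindPos_le pr.1 buf)]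
    have := pvFindPos_le pr.1 buf
    simp only [List.length_append, List.length_cons, List.length_take, List.length_drop]
    omega
  by_cases hgt : PySem.List.len nb > kk
  · have h1 : nb.length = kk.toNat + 1 := by
      simp [PySem.List.len_eq] at hgt; omega
    simp only [hgt, if_true]
    rw [List.dropLast_eq_take, h1]
    simp
  · have h1 : nb.length ≤ kk.toNat := by
      simp [PySem.List.len_eq] at hgt; omega
    simp only [hgt, if_false]
    exact (List.take_of_length_le h1).symm

-- B's fold equals the fold of trimmed insertBy steps (bound and order are invariant)
lemma pvFold_eq (kk : Int) (hkk : 0 ≤ kk) :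
    ∀ (l : List (Int × Int)) (buf : List (Int × Int)), buf.length ≤ kk.toNat →
      buf.Pairwise (fun a b => b.1 ≤ a.1) →
      l.foldl (fun buf pr =>
          let nb := PySem.List.insert buf (pvBisect buf pr.1 0 (PySem.List.len buf)) pr
          if PySem.List.len nb > kk then nb.dropLast else nb) buf
        = l.foldl (fun buf pr =>
            (PySem.List.insertBy (fun a b => decide (b.1 < a.1)) pr buf).take kk.toNat) buf := by
  intro l
  induction l with
  | nil => intro buf _ _; rfl
  | cons x t ih =>
    intro buf hlen hsort
    simp only [List.foldl_cons]
    rw [pvStep_eq kk hkk x buf hlen hsort]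
    exact ih _ (by simp [List.length_take])
      ((insertBy_pairwise x buf hsort).sublist (List.take_sublist _ _))

-- trimming to K commutes with insertion into an already-trimmed buffer
lemma take_insertBy_take {α : Type} (bf : α → α → Bool) (x : α) :
    ∀ (s : List α) (K : Nat),
      (PySem.List.insertBy bf x (s.take K)).take K = (PySem.List.insertBy bf x s).take K := by
  intro s
  induction s with
  | nil => intro K; simp
  | cons y t ih =>
    intro K
    cases K with
    | zero => simp
    | succ m =>
      simp only [List.take_succ_cons, PySem.List.insertBy]
      by_cases h : bf x y = true
      · simp only [h, if_true, List.take_succ_cons]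
        cases m with
        | zero => simp
        | succ n =>
          simp only [List.take_succ_cons, List.take_take]
          rw [Nat.min_eq_left (by omega)]
      · simp [h, ih m]

-- a fold of trimmed insertions is the trim of the fold of insertions
lemma foldl_insert_take {α : Type} (bf : α → α → Bool) (K : Nat) :
    ∀ (l s : List α),
      l.foldl (fun buf pr => (PySem.List.insertBy bf pr buf).take K) (s.take K)
        = (l.foldl (fun acc pr => PySem.List.insertBy bf pr acc) s).take K := by
  intro l
  induction l with
  | nil => intro s; rfl
  | cons x t ih =>
    intro s
    simp only [List.foldl_cons]
    rw [take_insertBy_take bf x s K]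
    exact ih (PySem.List.insertBy bf x s)

-- [xs[i] for i in range(m)] is take, for m ≤ len(xs)  (Nat bound)
lemma mapRange_getD_nat {α : Type} [Inhabited α] (xs : List α) (d : α) :
    ∀ (n : Nat), n ≤ xs.length →
      (PySem.List.pyRange 0 (n : Int) 1).map (fun i => PySem.List.pyGetD xs i d) = xs.take n := by
  intro n
  induction n with
  | zero => intro _; simp
  | succ m ih =>
    intro h
    have hm : ((m : Int) + 1) = ((m + 1 : Nat) : Int) := by push_cast; ring
    rw [← hm, PySem.List.pyRange_one_succ_right (by positivity), List.map_append,
        ih (by omega), List.take_add_one]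
    have hget : PySem.List.pyGetD xs (m : Int) d = xs[m]'(by omega) :=
      PySem.List.pyGetD_ofNat xs m d (by omega)
    simp [hget, List.getElem?_eq_getElem (by omega : m < xs.length)]

-- Int-bound version (negative m gives the empty range)
lemma mapRange_getD {α : Type} [Inhabited α] (xs : List α) (d : α) (m : Int)
    (h : m ≤ (xs.length : Int)) :
    (PySem.List.pyRange 0 m 1).map (fun i => PySem.List.pyGetD xs i d) = xs.take m.toNat := by
  by_cases hm : m ≤ 0
  · rw [PySem.List.pyRange_one_eq_nil hm]
    have : m.toNat = 0 := by omega
    simp [this]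
  · have : m = ((m.toNat : Nat) : Int) := by omega
    rw [this]
    exact mapRange_getD_nat xs d m.toNat (by omega)

-- ===== VERDICT (by name: the statement is the Claim_ definition above) =====
theorem top_k_recommendations_spec : Claim_equal_top_k_recommendations := by
  intro scores rated_indices k _
  unfold Spec_top_k_recommendations top_k_recommendations top_k_recommendations_alt
  simp only []
  -- notation
  set bf : (Int × Int) → (Int × Int) → Bool := fun a b => decide (b.1 < a.1) with hbf
  set f : Int → Int × Int := fun i => (PySem.List.pyGetD scores i 0, i) with hf
  set items : List (Int × Int) :=
    ((PySem.List.pyRange 0 (PySem.List.len scores) 1).filter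
      (fun i => decide (¬ (i ∈ rated_indices)))).map f with hitems
  -- A's remainItems is items
  have hA0 : (PySem.List.pyRange 0 (PySem.List.len scores) 1).foldl
      (fun acc i => if ¬ (i ∈ rated_indices) then acc ++ [f i] else acc) ([] : List (Int × Int))
      = items := by
    rw [PySem.List.foldl_append_ite (fun i => ¬ (i ∈ rated_indices)) f]
    simp [hitems]
  rw [hA0]
  -- A's sorted list as a fold of insertions
  set srt := PySem.List.sorted items (fun x => x.1) true with hsrt
  have hfold : srt = items.foldl (fun acc x => PySem.List.insertBy bf x acc) [] :=
    PySem.List.sorted_rev_eq_foldl_insertBy items (fun x => x.1)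
  -- A's comprehension is a take of srt.map snd
  have hlenA : min k (PySem.List.len srt) ≤ (srt.length : Int) := by
    simp [PySem.List.len_eq]
  rw [show (fun i => (PySem.List.pyGetD srt i ((0 : Int), (0 : Int))).2)
        = (fun p : Int × Int => p.2) ∘ (fun i => PySem.List.pyGetD srt i ((0 : Int), (0 : Int)))
      from rfl,
    ← List.map_map, mapRange_getD srt ((0 : Int), (0 : Int)) _ hlenA]
  -- B's fold is the trimmed fold of insertions over items
  have hB : (PySem.List.enumerate scores).foldl
      (fun buf p =>
        if ¬ (p.1 ∈ rated_indices) then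
          let nb := PySem.List.insert buf (pvBisect buf p.2 0 (PySem.List.len buf)) (p.2, p.1)
          if PySem.List.len nb > max k 0 then nb.dropLast else nb
        else buf) ([] : List (Int × Int))
      = srt.take (max k 0).toNat := by
    rw [PySem.List.enumerate_eq_map_pyRange scores 0, List.foldl_map,
        PySem.List.foldl_ite_eq_foldl_filter
          (fun j => ¬ (j ∈ rated_indices))
          (fun buf j =>
            let nb := PySem.List.insert buf
              (pvBisect buf (PySem.List.pyGetD scores j 0) 0 (PySem.List.len buf))
              (PySem.List.pyGetD scores j 0, j)
            if PySem.List.len nb > max k 0 then nb.dropLast else nb)]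
    rw [show ((PySem.List.pyRange 0 (PySem.List.len scores) 1).filter
          (fun j => decide (¬ (j ∈ rated_indices)))).foldl
          (fun buf j =>
            let nb := PySem.List.insert buf
              (pvBisect buf (PySem.List.pyGetD scores j 0) 0 (PySem.List.len buf))
              (PySem.List.pyGetD scores j 0, j)
            if PySem.List.len nb > max k 0 then nb.dropLast else nb) []
        = items.foldl (fun buf pr =>
            let nb := PySem.List.insert buf (pvBisect buf pr.1 0 (PySem.List.len buf)) pr
            if PySem.List.len nb > max k 0 then nb.dropLast else nb) []
      from (List.foldl_map (f := f)
        (g := fun buf pr =>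
          let nb := PySem.List.insert buf (pvBisect buf pr.1 0 (PySem.List.len buf)) pr
          if PySem.List.len nb > max k 0 then nb.dropLast else nb)
        (l := (PySem.List.pyRange 0 (PySem.List.len scores) 1).filter
          (fun j => decide (¬ (j ∈ rated_indices)))) (init := [])).symm]
    rw [pvFold_eq (max k 0) (le_max_right k 0) items [] (by simp) (by simp)]
    have := foldl_insert_take bf (max k 0).toNat items []
    simpa [hfold, hbf] using this
  rw [hB]
  -- both sides are a take of srt, with the same effective length
  congr 1
  by_cases h : (srt.length : Int) ≤ k
  · have h1 : (min k (PySem.List.len srt)).toNat = srt.length := by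
      simp [PySem.List.len_eq]; omega
    have h2 : srt.length ≤ (max k 0).toNat := by omega
    rw [h1, List.take_of_length_le (le_refl _), List.take_of_length_le h2]
  · have h1 : (min k (PySem.List.len srt)).toNat = k.toNat := by
      simp [PySem.List.len_eq]; omega
    have h2 : (max k 0).toNat = k.toNat := by omega
    rw [h1, h2]
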